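-- pv_equiv track=rewrite | github.com/wearable-devices/WeightEstimation2K | optimizers/adafactor_bv.py | _factored_dims
-- ===== SOURCE A (Python) =====
-- def _factored_dims(
--         shape,
--         factored,
--         min_dim_size_to_factor
-- ):
--     """Whether to use a factored second moment estimator.
--
--     This function returns a tuple with the two largest axes to reduce over.
--     If no two dimensions have size >= min_dim_size_to_factor, return None.
--
--     Args:
--       shape: an input shape
--       factored: whether to use factored second-moment estimator for > 2d vars.
--       min_dim_size_to_factor: only factor accumulator if two array dimensions have at least this size.
--
--     Returns:
--       None or a tuple of ints
--     """
--     if not factored or len(shape) < 2: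
--         return None
--     sorted_dims = sorted(((x, i) for i, x in enumerate(shape)))
--     if shape[sorted_dims[-2][1]] < min_dim_size_to_factor:
--         return None
--     return int(sorted_dims[-2][1]), int(sorted_dims[-1][1])
-- ===== SOURCE B (Python) =====
-- def _factored_dims(
--         shape,
--         factored,
--         min_dim_size_to_factor
-- ):
--     """Single linear pass keeping the best and second-best (size, index) pairs
--     (lexicographic comparison, so ties on size go to the higher index, exactly
--     like sorting the pairs), instead of building and sorting the whole pair list."""
--     if not factored or len(shape) < 2:
--         return None
--     best = None
--     second = None
--     for i, x in enumerate(shape):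
--         p = (x, i)
--         if best is None or p > best:
--             second = best
--             best = p
--         elif second is None or p > second:
--             second = p
--     if second[0] < min_dim_size_to_factor:
--         return None
--     return int(second[1]), int(best[1])
-- ===== Notes on version B (the rewrite author's own statement) =====
-- stated objective: alternative
-- what changed: Replaces building and sorting the full (size, index) pair list with a single linear pass that maintains the best and second-best pairs under lexicographic comparison (ties on size break toward the higher index, matching sorted's order).
import Mathlib
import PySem

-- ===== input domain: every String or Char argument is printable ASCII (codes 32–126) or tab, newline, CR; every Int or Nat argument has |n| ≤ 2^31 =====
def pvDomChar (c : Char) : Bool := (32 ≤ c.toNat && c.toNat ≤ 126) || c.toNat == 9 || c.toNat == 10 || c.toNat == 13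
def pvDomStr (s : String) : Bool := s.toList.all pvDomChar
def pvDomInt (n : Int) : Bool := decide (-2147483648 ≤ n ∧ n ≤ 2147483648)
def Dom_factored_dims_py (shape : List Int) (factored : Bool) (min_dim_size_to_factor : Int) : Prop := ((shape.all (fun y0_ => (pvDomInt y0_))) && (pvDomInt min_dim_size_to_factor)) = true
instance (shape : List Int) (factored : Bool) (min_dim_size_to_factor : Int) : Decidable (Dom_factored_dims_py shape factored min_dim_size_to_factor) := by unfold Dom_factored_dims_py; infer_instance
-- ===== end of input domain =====

-- B replaces A's build-and-sort of all (size, index) pairs by a single linear pass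
-- keeping the best and second-best pair (alternative algorithm, same results).

-- ===== PORT A =====
def factored_dims_py (shape : List Int) (factored : Bool) (min_dim_size_to_factor : Int) : Option (Int × Int) :=
  if !factored || decide (shape.length < 2) then none
  else
    -- sorted_dims = sorted((x, i) for i, x in enumerate(shape))
    let sorted_dims := PySem.List.sorted2 ((PySem.List.enumerate shape 0).map (fun ix => (ix.2, ix.1))) (fun p => p.1) (fun p => p.2)
    match PySem.List.pyGet? sorted_dims (-2) with
    | none => none  -- unreachable: len(sorted_dims) = len(shape) ≥ 2
    | some s2 =>
      match PySem.List.pyGet? shape s2.2 with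
      | none => none  -- unreachable: s2.2 is a valid index of shape
      | some v =>
        if v < min_dim_size_to_factor then none
        else
          match PySem.List.pyGet? sorted_dims (-1) with
          | none => none  -- unreachable
          | some s1 => some (s2.2, s1.2)

-- ===== PORT B =====
-- p > q on Python pairs (lexicographic)
def pvLexGt (p q : Int × Int) : Bool := decide (q.1 < p.1) || (decide (p.1 = q.1) && decide (q.2 < p.2))

-- one iteration of B's loop body on state (best, second)
def pvStep (st : Option (Int × Int) × Option (Int × Int)) (p : Int × Int) : Option (Int × Int) × Option (Int × Int) :=
  match st with
  | (none, _) => (some p, none)          -- best is None (first element): second = best (= None); best = p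
  | (some b, second) =>
    if pvLexGt p b then (some p, some b)
    else
      match second with
      | none => (some b, some p)
      | some s => if pvLexGt p s then (some b, some p) else (some b, some s)

def factored_dims_py_alt (shape : List Int) (factored : Bool) (min_dim_size_to_factor : Int) : Option (Int × Int) :=
  if !factored || decide (shape.length < 2) then none
  else
    match (PySem.List.enumerate shape 0).foldl (fun st ix => pvStep st (ix.2, ix.1)) (none, none) with
    | (some b, some s) => if s.1 < min_dim_size_to_factor then none else some (s.2, b.2)
    | _ => none  -- unreachable: len(shape) ≥ 2 fills both slots

-- ===== PRECONDITION & SPEC =====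
def Spec_factored_dims_py (shape : List Int) (factored : Bool) (min_dim_size_to_factor : Int) (out : Option (Int × Int)) : Prop := out = factored_dims_py_alt shape factored min_dim_size_to_factor
instance (shape : List Int) (factored : Bool) (min_dim_size_to_factor : Int) (out : Option (Int × Int)) : Decidable (Spec_factored_dims_py shape factored min_dim_size_to_factor out) := by unfold Spec_factored_dims_py; infer_instance

-- ===== CLAIM (what is proved, stated in full; the proofs are below) =====
def Claim_equal_factored_dims_py : Prop := ∀ (shape : List Int) (factored : Bool) (min_dim_size_to_factor : Int), Dom_factored_dims_py shape factored min_dim_size_to_factor → Spec_factored_dims_py shape factored min_dim_size_to_factor (factored_dims_py shape factored min_dim_size_to_factor)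

-- ===== LEMMAS AND PROOFS =====

-- the strict lexicographic order on pairs, as a Prop
def pvLexLt (p q : Int × Int) : Prop := p.1 < q.1 ∨ (p.1 = q.1 ∧ p.2 < q.2)

lemma pvLexGt_iff (p q : Int × Int) : pvLexGt p q = true ↔ pvLexLt q p := by
  simp [pvLexGt, pvLexLt]; omega

lemma pvLexLt_trans {a b c : Int × Int} (h1 : pvLexLt a b) (h2 : pvLexLt b c) : pvLexLt a c := by
  simp only [pvLexLt] at *; omega

lemma pvLexLt_asymm {a b : Int × Int} (h : pvLexLt a b) : ¬ pvLexLt b a := by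
  simp only [pvLexLt] at *; omega

lemma pvLexLt_total {a b : Int × Int} (h : a ≠ b) : pvLexLt a b ∨ pvLexLt b a := by
  rcases a with ⟨a1, a2⟩; rcases b with ⟨b1, b2⟩
  simp only [pvLexLt, Prod.mk.injEq, ne_eq, not_and] at *; omega

lemma pvToLex_lt_iff (p q : Int × Int) : toLex p < toLex q ↔ pvLexLt p q := by
  simpa [pvLexLt] using (Prod.Lex.lt_iff (x := toLex p) (y := toLex q))

-- A's tuple sort is the sort under the lexicographic key
lemma pvSorted2_eq (xs : List (Int × Int)) :
    PySem.List.sorted2 xs (fun p => p.1) (fun p => p.2) = PySem.List.sorted xs (fun p => toLex p) := by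
  have h : (fun (a b : Int × Int) => (decide (a.1 < b.1) || (!decide (b.1 < a.1) && decide (a.2 < b.2))))
      = fun a b => decide (toLex a < toLex b) := by
    funext a b
    by_cases h1 : a.1 < b.1 <;> by_cases h2 : b.1 < a.1 <;> by_cases h3 : a.2 < b.2 <;>
      simp [h1, h2, h3, pvToLex_lt_iff, pvLexLt] <;> omega
  rw [PySem.List.sorted_eq_foldl_insertBy]
  unfold PySem.List.sorted2
  simp only [if_neg (by simp : ¬ (false = true))]
  rw [h]

-- B's loop invariant: after the processed prefix ps, the state holds the best and
-- second-best pair of ps (lexicographically)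
def pvInv (ps : List (Int × Int)) (st : Option (Int × Int) × Option (Int × Int)) : Prop :=
  match st with
  | (none, _) => ps = []
  | (some b, none) => ps = [b]
  | (some b, some s) => b ∈ ps ∧ s ∈ ps ∧ s ≠ b ∧
      (∀ p ∈ ps, p ≠ b → pvLexLt p b) ∧ (∀ p ∈ ps, p ≠ b → p ≠ s → pvLexLt p s)

lemma pvStep_inv (ps : List (Int × Int)) (st : Option (Int × Int) × Option (Int × Int))
    (p : Int × Int) (hinv : pvInv ps st) (hfresh : ∀ q ∈ ps, q.2 < p.2) :
    pvInv (ps ++ [p]) (pvStep st p) := by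
  have hne : ∀ q ∈ ps, q ≠ p := by
    intro q hq h
    have := hfresh q hq
    rw [h] at this; omega
  have hmem : ∀ q : Int × Int, q ∈ ps ++ [p] ↔ q ∈ ps ∨ q = p := by
    intro q; simp
  rcases st with ⟨b?, s?⟩
  rcases b? with _ | b
  · simp only [pvInv] at hinv; subst hinv; simp [pvStep, pvInv]
  · rcases s? with _ | s
    · simp only [pvInv] at hinv; subst hinv
      have hbp : b ≠ p := hne b (by simp)
      simp only [pvStep]
      by_cases hgt : pvLexGt p b = true
      · rw [if_pos hgt]
        have hlt : pvLexLt b p := (pvLexGt_iff p b).mp hgt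
        simp only [pvInv]
        refine ⟨by simp, by simp, hbp, ?_, ?_⟩
        · intro q hq hqp
          rcases (hmem q).mp hq with h | h
          · simp at h; subst h; exact hlt
          · exact absurd h hqp
        · intro q hq hqp hqb
          rcases (hmem q).mp hq with h | h
          · simp at h; exact absurd h hqb
          · exact absurd h hqp
      · rw [if_neg hgt]
        have hlt : pvLexLt p b := by
          rcases pvLexLt_total (Ne.symm hbp) with h | h
          · exact h
          · exact absurd ((pvLexGt_iff p b).mpr h) hgt
        simp only [pvInv]
        refine ⟨by simp, by simp, Ne.symm hbp, ?_, ?_⟩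
        · intro q hq hqb
          rcases (hmem q).mp hq with h | h
          · simp at h; exact absurd h hqb
          · subst h; exact hlt
        · intro q hq hqb hqp
          rcases (hmem q).mp hq with h | h
          · simp at h; exact absurd h hqb
          · exact absurd h hqp
    · simp only [pvInv] at hinv
      obtain ⟨hb, hs, hsb, hmax, hsec⟩ := hinv
      have hbp : b ≠ p := hne b hb
      have hsp : s ≠ p := hne s hs
      simp only [pvStep]
      by_cases hgt : pvLexGt p b = true
      · rw [if_pos hgt]
        have hltbp : pvLexLt b p := (pvLexGt_iff p b).mp hgt
        simp only [pvInv]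
        refine ⟨by simp, by simp [hb], hbp, ?_, ?_⟩
        · intro q hq hqp
          rcases (hmem q).mp hq with h | h
          · by_cases hqb : q = b
            · subst hqb; exact hltbp
            · exact pvLexLt_trans (hmax q h hqb) hltbp
          · exact absurd h hqp
        · intro q hq hqp hqb
          rcases (hmem q).mp hq with h | h
          · exact hmax q h hqb
          · exact absurd h hqp
      · rw [if_neg hgt]
        have hltpb : pvLexLt p b := by
          rcases pvLexLt_total (Ne.symm hbp) with h | h
          · exact h
          · exact absurd ((pvLexGt_iff p b).mpr h) hgt
        by_cases hgt2 : pvLexGt p s = true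
        · rw [if_pos hgt2]
          have hltsp : pvLexLt s p := (pvLexGt_iff p s).mp hgt2
          simp only [pvInv]
          refine ⟨by simp [hb], by simp, Ne.symm hbp, ?_, ?_⟩
          · intro q hq hqb
            rcases (hmem q).mp hq with h | h
            · exact hmax q h hqb
            · subst h; exact hltpb
          · intro q hq hqb hqp
            rcases (hmem q).mp hq with h | h
            · by_cases hqs : q = s
              · subst hqs; exact hltsp
              · exact pvLexLt_trans (hsec q h hqb hqs) hltsp
            · exact absurd h hqp
        · rw [if_neg hgt2]
          have hltps : pvLexLt p s := by
            rcases pvLexLt_total (Ne.symm hsp) with h | h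
            · exact h
            · exact absurd ((pvLexGt_iff p s).mpr h) hgt2
          simp only [pvInv]
          refine ⟨by simp [hb], by simp [hs], hsb, ?_, ?_⟩
          · intro q hq hqb
            rcases (hmem q).mp hq with h | h
            · exact hmax q h hqb
            · subst h; exact hltpb
          · intro q hq hqb hqs
            rcases (hmem q).mp hq with h | h
            · exact hsec q h hqb hqs
            · subst h; exact hltps

lemma pvFold_inv : ∀ (l ps : List (Int × Int)) (st : Option (Int × Int) × Option (Int × Int)),
    pvInv ps st → (∀ q ∈ ps, ∀ r ∈ l, q.2 < r.2) → l.Pairwise (fun p q => p.2 < q.2) →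
    pvInv (ps ++ l) (l.foldl pvStep st) := by
  intro l
  induction l with
  | nil => intro ps st h _ _; simpa using h
  | cons p l ih =>
    intro ps st hinv hcross hpw
    have hstep := pvStep_inv ps st p hinv (fun q hq => hcross q hq p (by simp))
    have := ih (ps ++ [p]) (pvStep st p) hstep
      (by intro q hq r hr; simp at hq
          rcases hq with hq | hq
          · exact hcross q hq r (by simp [hr])
          · subst hq; exact (List.pairwise_cons.mp hpw).1 r hr)
      (List.pairwise_cons.mp hpw).2
    simpa using this

-- the last two entries of the sorted pair list are the best and second-best pair
lemma pvSorted_top2 (ps : List (Int × Int)) (hpw : ps.Pairwise (fun p q => p.2 < q.2))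
    (hlen : 2 ≤ ps.length) :
    ∃ b s, PySem.List.pyGet? (PySem.List.sorted ps (fun p => toLex p)) (-1) = some b ∧
      PySem.List.pyGet? (PySem.List.sorted ps (fun p => toLex p)) (-2) = some s ∧
      b ∈ ps ∧ s ∈ ps ∧ s ≠ b ∧
      (∀ q ∈ ps, q ≠ b → pvLexLt q b) ∧ (∀ q ∈ ps, q ≠ b → q ≠ s → pvLexLt q s) := by
  have hperm := PySem.List.sorted_perm ps (fun p => toLex p) false
  have hle := PySem.List.sorted_pairwise ps (fun p => toLex p)
  have hndps : ps.Nodup := hpw.imp (fun {a b} h heq => by rw [heq] at h; omega)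
  have hnd : (PySem.List.sorted ps (fun p => toLex p)).Nodup := hperm.nodup_iff.mpr hndps
  have hL : (PySem.List.sorted ps (fun p => toLex p)).length = ps.length := hperm.length_eq
  have h1 : (PySem.List.sorted ps (fun p => toLex p)).length - 1 < (PySem.List.sorted ps (fun p => toLex p)).length := by omega
  have h2 : (PySem.List.sorted ps (fun p => toLex p)).length - 2 < (PySem.List.sorted ps (fun p => toLex p)).length := by omega
  refine ⟨(PySem.List.sorted ps (fun p => toLex p))[(PySem.List.sorted ps (fun p => toLex p)).length - 1],
          (PySem.List.sorted ps (fun p => toLex p))[(PySem.List.sorted ps (fun p => toLex p)).length - 2],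
          ?_, ?_, ?_, ?_, ?_, ?_, ?_⟩
  · rw [PySem.List.pyGet?_neg_ofNat _ 1 (by omega) (by omega)]
    exact List.getElem?_eq_getElem h1
  · rw [PySem.List.pyGet?_neg_ofNat _ 2 (by omega) (by omega)]
    exact List.getElem?_eq_getElem h2
  · exact hperm.mem_iff.mp (List.getElem_mem h1)
  · exact hperm.mem_iff.mp (List.getElem_mem h2)
  · intro h
    have := hnd.getElem_inj_iff.mp h
    omega
  · intro q hq hqb
    obtain ⟨j, hj, hjq⟩ := List.getElem_of_mem (hperm.mem_iff.mpr hq)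
    have hmono := PySem.List.key_sorted_getElem_mono ps (fun p => toLex p)
      (p := j) (q := (PySem.List.sorted ps (fun p => toLex p)).length - 1) (by omega) h1
    rw [hjq] at hmono
    have hne : toLex q ≠ toLex ((PySem.List.sorted ps (fun p => toLex p))[(PySem.List.sorted ps (fun p => toLex p)).length - 1]) :=
      fun h => hqb (toLex.injective h)
    exact (pvToLex_lt_iff _ _).mp (lt_of_le_of_ne hmono hne)
  · intro q hq hqb hqs
    obtain ⟨j, hj, hjq⟩ := List.getElem_of_mem (hperm.mem_iff.mpr hq)
    have hjne : j ≠ (PySem.List.sorted ps (fun p => toLex p)).length - 1 := by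
      intro h
      apply hqb
      subst h
      exact hjq.symm
    have hmono := PySem.List.key_sorted_getElem_mono ps (fun p => toLex p)
      (p := j) (q := (PySem.List.sorted ps (fun p => toLex p)).length - 2) (by omega) h2
    rw [hjq] at hmono
    have hne : toLex q ≠ toLex ((PySem.List.sorted ps (fun p => toLex p))[(PySem.List.sorted ps (fun p => toLex p)).length - 2]) :=
      fun h => hqs (toLex.injective h)
    exact (pvToLex_lt_iff _ _).mp (lt_of_le_of_ne hmono hne)

-- the best/second-best pair of a list is unique
lemma pvTop2_unique (ps : List (Int × Int)) (b s b' s' : Int × Int)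
    (hb : b ∈ ps) (hs : s ∈ ps) (hsb : s ≠ b)
    (hmax : ∀ q ∈ ps, q ≠ b → pvLexLt q b) (hsec : ∀ q ∈ ps, q ≠ b → q ≠ s → pvLexLt q s)
    (hb' : b' ∈ ps) (hs' : s' ∈ ps) (hsb' : s' ≠ b')
    (hmax' : ∀ q ∈ ps, q ≠ b' → pvLexLt q b') (hsec' : ∀ q ∈ ps, q ≠ b' → q ≠ s' → pvLexLt q s') :
    b = b' ∧ s = s' := by
  have hbb : b = b' := by
    by_contra hne
    exact pvLexLt_asymm (hmax' b hb hne) (hmax b' hb' (Ne.symm hne))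
  subst hbb
  refine ⟨rfl, ?_⟩
  by_contra hne
  exact pvLexLt_asymm (hsec' s hs hsb hne) (hsec s' hs' hsb' (Ne.symm hne))

-- ===== VERDICT =====
theorem factored_dims_py_spec : Claim_equal_factored_dims_py := by
  intro shape factored min_dim_size_to_factor _
  show factored_dims_py shape factored min_dim_size_to_factor = factored_dims_py_alt shape factored min_dim_size_to_factor
  by_cases hguard : (!factored || decide (shape.length < 2)) = true
  · simp only [factored_dims_py, factored_dims_py_alt, if_pos hguard]
  · have hlen : 2 ≤ shape.length := by
      simp only [Bool.or_eq_true, decide_eq_true_iff, not_or] at hguard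
      omega
    -- the (size, index) pair list
    have hpw : ((PySem.List.enumerate shape 0).map (fun ix => (ix.2, ix.1))).Pairwise
        (fun p q : Int × Int => p.2 < q.2) := by
      rw [List.pairwise_map]
      exact PySem.List.pairwise_lt_enumerate shape 0
    have hplen : ((PySem.List.enumerate shape 0).map (fun ix => (ix.2, ix.1))).length = shape.length := by
      rw [List.length_map, PySem.List.length_enumerate]
    -- B's fold over enumerate is the fold over the pair list
    have hfoldeq : (PySem.List.enumerate shape 0).foldl (fun st ix => pvStep st (ix.2, ix.1)) ((none, none) : Option (Int × Int) × Option (Int × Int))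
        = ((PySem.List.enumerate shape 0).map (fun ix => (ix.2, ix.1))).foldl pvStep (none, none) := by
      rw [List.foldl_map]
    have hinv : pvInv ((PySem.List.enumerate shape 0).map (fun ix => (ix.2, ix.1)))
        (((PySem.List.enumerate shape 0).map (fun ix => (ix.2, ix.1))).foldl pvStep (none, none)) := by
      have := pvFold_inv ((PySem.List.enumerate shape 0).map (fun ix => (ix.2, ix.1))) [] (none, none)
        (by simp [pvInv]) (by simp) hpw
      simpa using this
    rcases hres : ((PySem.List.enumerate shape 0).map (fun ix => (ix.2, ix.1))).foldl pvStep (none, none) with ⟨b?, s?⟩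
    rw [hres] at hinv
    rcases b? with _ | b
    · simp only [pvInv] at hinv
      rw [hinv] at hplen
      simp at hplen
      omega
    · rcases s? with _ | s
      · simp only [pvInv] at hinv
        rw [hinv] at hplen
        simp at hplen
        omega
      · obtain ⟨hbm, hsm, hsb, hmax, hsec⟩ := hinv
        obtain ⟨b', s', e1, e2, hbm', hsm', hsb', hmax', hsec'⟩ :=
          pvSorted_top2 ((PySem.List.enumerate shape 0).map (fun ix => (ix.2, ix.1))) hpw (by omega)
        obtain ⟨hbb, hss⟩ := pvTop2_unique _ b s b' s' hbm hsm hsb hmax hsec hbm' hsm' hsb' hmax' hsec'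
        -- s is a genuine (value, index) pair of shape
        obtain ⟨k, hk, hks⟩ : ∃ k, ∃ h : k < shape.length, s = (shape[k], (k : Int)) := by
          rcases List.mem_map.mp hsm with ⟨ix, hix, hixs⟩
          rcases (PySem.List.mem_enumerate_iff shape 0 ix).mp hix with ⟨k, hk, hike⟩
          exact ⟨k, hk, by rw [← hixs, hike]; simp⟩
        have e3 : PySem.List.pyGet? shape s.2 = some s.1 := by
          rw [hks]
          simp [PySem.List.pyGet?_natCast, List.getElem?_eq_getElem hk]
        subst hbb
        subst hss
        simp only [factored_dims_py, factored_dims_py_alt, if_neg hguard]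
        rw [pvSorted2_eq, hfoldeq, hres, e1, e2]
        simp [e3]
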